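-- pv_equiv track=rewrite | github.com/BrettRey/erdos-problem-993 | roots_analysis.py | get_path_poly
-- ===== SOURCE A (Python) =====
-- def get_path_poly(n):
--     """Computes independence polynomial of Path graph P_n."""
--     if n == 0: return [1]
--     if n == 1: return [1, 1]
--
--     # Recurrence: P_n = P_{n-1} + x * P_{n-2}
--     p_prev = [1, 1] # P_1
--     p_prev2 = [1]   # P_0
--
--     for i in range(2, n + 1):
--         # x * P_{n-2} shifts coefficients by 1
--         term2 = [0] + p_prev2
--
--         # Add P_{n-1} + term2
--         len1 = len(p_prev)
--         len2 = len(term2)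
--         new_poly = [0] * max(len1, len2)
--
--         for k in range(len1):
--             new_poly[k] += p_prev[k]
--         for k in range(len2):
--             new_poly[k] += term2[k]
--
--         p_prev2 = p_prev
--         p_prev = new_poly
--
--     return p_prev
-- ===== SOURCE B (Python) =====
-- def get_path_poly(n):
--     """Computes independence polynomial of Path graph P_n.
--
--     Closed form: the k-th coefficient is C(n+1-k, k), computed incrementally in O(n).
--     """
--     coeffs = [1]
--     c = 1
--     for k in range(1, (n + 1) // 2 + 1):
--         c = c * (n + 2 - 2 * k) * (n + 3 - 2 * k) // (k * (n + 2 - k))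
--         coeffs.append(c)
--     return coeffs
-- ===== Notes on version B (the rewrite author's own statement) =====
-- stated objective: faster
-- what changed: Replaces the polynomial recurrence P_n = P_{n-1} + x*P_{n-2} (building each coefficient list by pairwise addition) with the closed form coeff[k] = C(n+1-k, k), computed incrementally in one O(n) pass. Pre_ excludes negative n, on which the path graph P_n is undefined and neither program's value is specified (A returns its initial loop state unchanged, B returns the constant term alone).
-- outside the precondition, e.g. on get_path_poly(-1): A returns [1, 1], B returns [1]
import Mathlib
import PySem

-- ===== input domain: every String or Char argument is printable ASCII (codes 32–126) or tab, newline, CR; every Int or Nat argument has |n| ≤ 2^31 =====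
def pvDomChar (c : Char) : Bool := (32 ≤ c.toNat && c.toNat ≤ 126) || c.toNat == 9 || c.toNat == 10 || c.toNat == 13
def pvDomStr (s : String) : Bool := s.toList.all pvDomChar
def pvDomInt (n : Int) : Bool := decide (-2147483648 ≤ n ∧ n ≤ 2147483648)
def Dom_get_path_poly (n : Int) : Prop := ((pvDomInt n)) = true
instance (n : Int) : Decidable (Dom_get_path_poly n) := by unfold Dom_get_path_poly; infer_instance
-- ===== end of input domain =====

-- B computes the closed-form coefficients C(n+1-k, k) in one pass instead of iterating
-- the polynomial recurrence P_n = P_{n-1} + x*P_{n-2}; equivalence is proved for all n ≥ 0.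

-- ===== PORT A =====
-- one loop-body step of A: term2 = [0] + p_prev2; new_poly = the two index-loop additions
def pvStepA (st : List Int × List Int) : List Int × List Int :=
  let p_prev2 := st.1
  let p_prev := st.2
  let term2 := (0 : Int) :: p_prev2
  let len1 := p_prev.length
  let len2 := term2.length
  let np0 := List.replicate (max len1 len2) (0 : Int)
  let np1 := (List.range len1).foldl (fun acc k => acc.set k (acc.getD k 0 + p_prev.getD k 0)) np0
  let np2 := (List.range len2).foldl (fun acc k => acc.set k (acc.getD k 0 + term2.getD k 0)) np1
  (p_prev, np2)

def get_path_poly (n : Int) : List Int :=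
  if n = 0 then [1]
  else if n = 1 then [1, 1]
  else ((PySem.List.pyRange 2 (n + 1) 1).foldl (fun st _i => pvStepA st) ([1], [1, 1])).2

-- ===== PORT B =====
def get_path_poly_alt (n : Int) : List Int :=
  ((PySem.List.pyRange 1 (PySem.Int.floordiv (n + 1) 2 + 1) 1).foldl
    (fun (st : List Int × Int) k =>
      let c := PySem.Int.floordiv (st.2 * (n + 2 - 2 * k) * (n + 3 - 2 * k)) (k * (n + 2 - k))
      (st.1 ++ [c], c))
    ([1], 1)).1

-- ===== PRECONDITION & SPEC =====
-- Pre_ excludes negative n, on which the path graph P_n is undefined and neither program's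
-- value is specified (A returns its initial loop state unchanged, B returns the constant term alone).
def Pre_get_path_poly (n : Int) : Prop := 0 ≤ n
instance (n : Int) : Decidable (Pre_get_path_poly n) := by unfold Pre_get_path_poly; infer_instance
def pvWitness_get_path_poly : Int := 5

def Spec_get_path_poly (n : Int) (out : List Int) : Prop := out = get_path_poly_alt n
instance (n : Int) (out : List Int) : Decidable (Spec_get_path_poly n out) := by unfold Spec_get_path_poly; infer_instance

-- ===== CLAIM (what is proved, stated in full; the proofs are below) =====
def Claim_equal_get_path_poly : Prop := ∀ (n : Int), Dom_get_path_poly n → Pre_get_path_poly n → Spec_get_path_poly n (get_path_poly n)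

-- ===== LEMMAS AND PROOFS =====

-- the mathematical objects both loops compute: coefficient lists of the path polynomial
def pvAdd (x y : List Int) : List Int :=
  (List.range (max x.length y.length)).map (fun k => x.getD k 0 + y.getD k 0)

def pvF : Nat → List Int
  | 0 => [1]
  | 1 => [1, 1]
  | (m + 2) => pvAdd (pvF (m + 1)) (0 :: pvF m)

def pvC (m k : Nat) : Int := (Nat.choose (m + 1 - k) k : Int)

def pvBinom (m : Nat) : List Int := (List.range ((m + 1) / 2 + 1)).map (pvC m)

-- A's index-set loop "for k in range(j): new_poly[k] += src[k]" is a pointwise map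
lemma pvFoldSet_aux (src z : List Int) (j : Nat) (hj : j ≤ z.length) :
    (List.range j).foldl (fun acc k => acc.set k (acc.getD k 0 + src.getD k 0)) z
      = (List.range z.length).map
          (fun k => if k < j then z.getD k 0 + src.getD k 0 else z.getD k 0) := by
  induction j with
  | zero =>
      simp only [List.range_zero, List.foldl_nil, Nat.not_lt_zero, if_false]
      apply List.ext_getElem
      · simp
      · intro i h1 h2
        simp [List.getD_eq_getElem?_getD, List.getElem?_eq_getElem h1]
  | succ j ih =>
      have hj' : j ≤ z.length := Nat.le_of_succ_le hj
      have hjz : j < z.length := hj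
      rw [List.range_succ, List.foldl_append, ih hj', List.foldl_cons, List.foldl_nil]
      have hget : ((List.range z.length).map
          (fun k => if k < j then z.getD k 0 + src.getD k 0 else z.getD k 0)).getD j 0
          = z.getD j 0 := by
        rw [PySem.List.getD_map_range _ _ _ _ hjz]; simp
      rw [hget]
      apply List.ext_getElem
      · simp
      · intro i h1 h2
        simp only [List.getElem_set, List.getElem_map, List.getElem_range]
        by_cases hij : j = i
        · subst hij; simp
        · simp only [hij, if_false]
          rcases Nat.lt_trichotomy i j with h|h|h
          · simp only [if_pos h, if_pos (Nat.lt_succ_of_lt h)]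
          · omega
          · simp only [if_neg (by omega : ¬ i < j), if_neg (by omega : ¬ i < j + 1)]

lemma pvFoldSet (src z : List Int) (h : src.length ≤ z.length) :
    (List.range src.length).foldl (fun acc k => acc.set k (acc.getD k 0 + src.getD k 0)) z
      = (List.range z.length).map (fun k => z.getD k 0 + src.getD k 0) := by
  rw [pvFoldSet_aux src z src.length h]
  apply List.map_congr_left
  intro k hk
  by_cases hks : k < src.length
  · simp [hks]
  · simp [hks]

lemma pvStepA_eq (a b : List Int) : pvStepA (a, b) = (b, pvAdd b ((0 : Int) :: a)) := by
  unfold pvStepA pvAdd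
  simp only []
  rw [pvFoldSet b (List.replicate (max b.length (((0:Int)::a).length)) 0) (by simp)]
  rw [pvFoldSet ((0:Int)::a) _ (by simp)]
  refine congrArg (Prod.mk b) ?_
  apply List.ext_getElem
  · simp
  · intro i h1 h2
    simp only [List.length_map, List.length_range, List.length_replicate, List.length_cons] at h1 h2
    rw [List.getElem_map, List.getElem_map, List.getElem_range, List.getElem_range]
    rw [PySem.List.getD_map_range _ _ _ _ (by simpa using h1)]
    simp

lemma pvIter (j : Nat) : pvStepA^[j] ([1], [1, 1]) = (pvF j, pvF (j + 1)) := by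
  induction j with
  | zero => rfl
  | succ j ih =>
      rw [Function.iterate_succ_apply', ih, pvStepA_eq]
      rfl

-- A's outer loop body ignores the range element: the fold is function iteration
lemma pvFoldl_const {α β : Type} (f : β → β) (l : List α) (init : β) :
    l.foldl (fun st _ => f st) init = f^[l.length] init := by
  induction l generalizing init with
  | nil => rfl
  | cons x xs ih => simp [List.foldl_cons, ih, Function.iterate_succ_apply]

lemma pvA_eq_F (m : Nat) : get_path_poly (m : Int) = pvF m := by
  match m with
  | 0 => rfl
  | 1 => rfl
  | (m + 2) =>
      unfold get_path_poly
      rw [if_neg (by omega), if_neg (by omega), pvFoldl_const pvStepA]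
      have hl : (PySem.List.pyRange 2 (((m + 2 : Nat) : Int) + 1) 1).length = m + 1 := by
        rw [PySem.List.length_pyRange_one]; push_cast; omega
      rw [hl, pvIter (m + 1)]

-- the exact-division step of B: C(m+2-k,k-1)*(m+2-2k)*(m+3-2k) // (k*(m+2-k)) = C(m+1-k,k)
lemma pvChooseStep (a j : Nat) (hj : j + 1 ≤ a) :
    Nat.choose (a + 1) j * (a - j) * (a + 1 - j) = Nat.choose a (j + 1) * (j + 1) * (a + 1) := by
  have h1 := Nat.choose_succ_right_eq (a + 1) j
  have h2 := Nat.choose_mul_succ_eq a (j + 1)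
  calc Nat.choose (a+1) j * (a - j) * (a + 1 - j)
      = Nat.choose (a+1) j * (a + 1 - j) * (a - j) := by ring
    _ = Nat.choose (a+1) (j+1) * (j+1) * (a - j) := by rw [← h1]
    _ = Nat.choose (a+1) (j+1) * (a + 1 - (j+1)) * (j+1) := by
          rw [show a + 1 - (j+1) = a - j from by omega]; ring
    _ = Nat.choose a (j+1) * (a+1) * (j+1) := by rw [← h2]
    _ = Nat.choose a (j+1) * (j+1) * (a+1) := by ring

lemma pvDivStep (m k : Nat) (hk1 : 1 ≤ k) (hk2 : k ≤ (m + 1) / 2) :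
    PySem.Int.floordiv (pvC m (k - 1) * ((m : Int) + 2 - 2 * k) * ((m : Int) + 3 - 2 * k))
      ((k : Int) * ((m : Int) + 2 - k)) = pvC m k := by
  have h2k : 2 * k ≤ m + 1 := by omega
  have e1 : pvC m (k - 1) = (Nat.choose (m + 1 - k + 1) (k - 1) : Int) := by
    unfold pvC
    rw [show m + 1 - (k - 1) = m + 1 - k + 1 from by omega]
  have c1 : ((m : Int) + 2 - 2 * k) = ((m + 1 - k - (k - 1) : Nat) : Int) := by omega
  have c2 : ((m : Int) + 3 - 2 * k) = ((m + 1 - k + 1 - (k - 1) : Nat) : Int) := by omega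
  have c3 : ((k : Int) * ((m : Int) + 2 - k)) = ((k * (m + 1 - k + 1) : Nat) : Int) := by
    rw [Nat.cast_mul, show ((m + 1 - k + 1 : Nat) : Int) = (m : Int) + 2 - k from by omega]
  rw [e1, c1, c2, c3, ← Nat.cast_mul, ← Nat.cast_mul, PySem.Int.floordiv_natCast]
  have hstep := pvChooseStep (m + 1 - k) (k - 1) (by omega)
  rw [show k - 1 + 1 = k from by omega] at hstep
  rw [hstep, mul_assoc, Nat.mul_div_cancel _ (by positivity)]
  unfold pvC; rfl

lemma pvB_loop (m t : Nat) (ht : t ≤ (m + 1) / 2) :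
    (PySem.List.pyRange 1 ((t : Int) + 1) 1).foldl
      (fun (st : List Int × Int) k =>
        let c := PySem.Int.floordiv (st.2 * ((m : Int) + 2 - 2 * k) * ((m : Int) + 3 - 2 * k))
                   (k * ((m : Int) + 2 - k))
        (st.1 ++ [c], c)) ([1], 1)
      = ((List.range (t + 1)).map (pvC m), pvC m t) := by
  induction t with
  | zero =>
      rw [show ((0:Nat):Int) + 1 = 1 from by norm_num, PySem.List.pyRange_one_eq_nil (by omega)]
      simp [pvC]
  | succ t ih =>
      have ht' : t ≤ (m + 1) / 2 := by omega
      rw [show ((t+1:Nat):Int) + 1 = ((t:Int) + 1) + 1 from by push_cast; ring,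
          PySem.List.pyRange_one_succ_right (by omega), List.foldl_append, ih ht',
          List.foldl_cons, List.foldl_nil]
      simp only []
      have hcast : (t : Int) + 1 = ((t + 1 : Nat) : Int) := by push_cast; ring
      rw [show pvC m t = pvC m ((t+1) - 1) from by norm_num, hcast,
          pvDivStep m (t+1) (by omega) (by omega)]
      rw [List.range_succ (n := t + 1), List.map_append]
      simp

lemma pvB_eq_binom (m : Nat) : get_path_poly_alt (m : Int) = pvBinom m := by
  unfold get_path_poly_alt pvBinom
  rw [show PySem.Int.floordiv ((m:Int) + 1) 2 = (((m+1)/2 : Nat) : Int) from by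
        rw [show (m:Int) + 1 = ((m+1:Nat):Int) from by push_cast; ring]
        exact_mod_cast PySem.Int.floordiv_natCast (m+1) 2,
      pvB_loop m ((m+1)/2) (le_refl _)]

lemma pvGetD_binom (m k : Nat) :
    (pvBinom m).getD k 0 = if k < (m + 1) / 2 + 1 then pvC m k else 0 := by
  by_cases h : k < (m + 1) / 2 + 1
  · rw [if_pos h]; unfold pvBinom; exact PySem.List.getD_map_range _ _ _ _ h
  · rw [if_neg h]; exact List.getD_eq_default _ _ (by simp [pvBinom]; omega)

-- Pascal's rule, entrywise on the coefficient lists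
lemma pvPascal (m : Nat) : pvAdd (pvBinom (m + 1)) ((0 : Int) :: pvBinom m) = pvBinom (m + 2) := by
  unfold pvAdd
  have hlen : max (pvBinom (m + 1)).length (((0 : Int) :: pvBinom m)).length
      = (m + 2 + 1) / 2 + 1 := by
    simp [pvBinom]; omega
  rw [hlen]
  show _ = (List.range ((m + 2 + 1) / 2 + 1)).map (pvC (m + 2))
  apply List.map_congr_left
  intro k hk
  simp only [List.mem_range] at hk
  match k with
  | 0 =>
      rw [List.getD_cons_zero, pvGetD_binom, if_pos (by omega)]
      simp [pvC]
  | (j + 1) =>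
      rw [List.getD_cons_succ, pvGetD_binom, pvGetD_binom]
      have hj : j ≤ m + 1 := by omega
      have hsplit : pvC (m + 2) (j + 1)
          = (Nat.choose (m + 1 - j) j : Int) + (Nat.choose (m + 1 - j) (j + 1) : Int) := by
        unfold pvC
        rw [show m + 2 + 1 - (j + 1) = (m + 1 - j) + 1 from by omega, Nat.choose_succ_succ']
        push_cast; ring
      rw [hsplit]
      by_cases h1 : j + 1 < (m + 1 + 1) / 2 + 1
      · rw [if_pos h1]
        by_cases h2 : j < (m + 1) / 2 + 1
        · rw [if_pos h2]; unfold pvC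
          rw [show m + 1 + 1 - (j + 1) = m + 1 - j from by omega]; ring
        · rw [if_neg h2]
          rw [show Nat.choose (m + 1 - j) j = 0 from Nat.choose_eq_zero_of_lt (by omega)]
          unfold pvC
          rw [show m + 1 + 1 - (j + 1) = m + 1 - j from by omega]; push_cast; ring
      · rw [if_neg h1, if_pos (by omega)]
        rw [show Nat.choose (m + 1 - j) (j + 1) = 0 from Nat.choose_eq_zero_of_lt (by omega)]
        unfold pvC; push_cast; ring

lemma pvF_eq_binom : ∀ m : Nat, pvF m = pvBinom m
  | 0 => by decide
  | 1 => by decide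
  | (m + 2) => by
      show pvAdd (pvF (m + 1)) (0 :: pvF m) = pvBinom (m + 2)
      rw [pvF_eq_binom m, pvF_eq_binom (m + 1)]
      exact pvPascal m

-- ===== VERDICT (by name: the statement is the Claim_ definition above) =====
theorem get_path_poly_spec : Claim_equal_get_path_poly := by
  intro n _hdom hpre
  unfold Spec_get_path_poly
  have h : n = ((n.toNat : Nat) : Int) := (Int.toNat_of_nonneg hpre).symm
  rw [h, pvA_eq_F, pvB_eq_binom, pvF_eq_binom]
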